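-- pv_equiv track=rewrite | github.com/rjwharry/algorithm | programmers/cipher-for-us/cipher-for-us.py | change_alphabet
-- ===== SOURCE A (Python) =====
-- alphabet_set = "abcdefghijklmnopqrstuvwxyz"
--
-- def change_alphabet(origin, skip_idx, index):
--     origin_idx = alphabet_set.find(origin)
--     to = origin_idx
--     while index > 0:
--         to += 1
--         to %= 26
--         if to in skip_idx:
--             index += 1
--         index -= 1
--     return alphabet_set[to]
-- ===== SOURCE B (Python) =====
-- alphabet_set = "abcdefghijklmnopqrstuvwxyz"
--
-- def change_alphabet(origin, skip_idx, index):
--     start = alphabet_set.find(origin)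
--     if index <= 0:
--         return alphabet_set[start % 26]
--     allowed = [p for p in range(26) if p not in skip_idx]
--     m = len(allowed)
--     j = sum(1 for p in allowed if p <= start)
--     return alphabet_set[allowed[(j + index - 1) % m]]
-- ===== Notes on version B (the rewrite author's own statement) =====
-- stated objective: faster
-- what changed: Replaces the step-by-step while loop (one iteration per shift, re-scanning skip_idx each step) by precomputing the 26 non-skipped alphabet positions once and landing on the index-th one directly with modular arithmetic.
import Mathlib
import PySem

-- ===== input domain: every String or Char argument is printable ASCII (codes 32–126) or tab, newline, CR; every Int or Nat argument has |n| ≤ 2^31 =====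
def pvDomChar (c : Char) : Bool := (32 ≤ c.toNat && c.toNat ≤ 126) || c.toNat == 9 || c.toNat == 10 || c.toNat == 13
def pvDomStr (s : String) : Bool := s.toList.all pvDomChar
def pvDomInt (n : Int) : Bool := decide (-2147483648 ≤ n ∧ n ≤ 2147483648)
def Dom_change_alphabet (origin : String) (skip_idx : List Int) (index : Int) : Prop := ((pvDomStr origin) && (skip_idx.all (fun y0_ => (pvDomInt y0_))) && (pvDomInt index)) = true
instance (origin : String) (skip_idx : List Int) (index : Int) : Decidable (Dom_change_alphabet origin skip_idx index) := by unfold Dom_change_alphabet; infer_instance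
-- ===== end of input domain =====

-- B precomputes the non-skipped alphabet positions once and lands on the index-th one by
-- modular arithmetic instead of A's one-step-per-shift while loop (objective: faster).

-- ===== PORT A =====
def pvAlpha : String := "abcdefghijklmnopqrstuvwxyz"   -- module constant alphabet_set

-- the while loop of A; fuel 26*index.toNat iterations suffice whenever the Python loop terminates (Pre_)
def changeLoop (skip_idx : List Int) : Nat → Int → Int → Int
  | 0, cur, _ => cur
  | fuel+1, cur, index =>
    if 0 < index then
      let cur' := PySem.Int.mod (cur + 1) 26
      changeLoop skip_idx fuel cur' (if cur' ∈ skip_idx then index else index - 1)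
    else cur

def change_alphabet (origin : String) (skip_idx : List Int) (index : Int) : String :=
  let origin_idx := PySem.Str.find pvAlpha origin
  let cur := changeLoop skip_idx (26 * index.toNat) origin_idx index
  match PySem.Str.pyGet? pvAlpha cur with   -- alphabet_set[cur]; never IndexError: -1 ≤ cur ≤ 25
  | some c => String.ofList [c]
  | none => ""

-- ===== PORT B =====
def change_alphabet_alt (origin : String) (skip_idx : List Int) (index : Int) : String :=
  let start := PySem.Str.find pvAlpha origin
  if index ≤ 0 then
    match PySem.Str.pyGet? pvAlpha (PySem.Int.mod start 26) with
    | some c => String.ofList [c]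
    | none => ""
  else
    let allowed := (PySem.List.pyRange 0 26 1).filter (fun p => decide (p ∉ skip_idx))
    let m := PySem.List.len allowed
    let j := allowed.countP (fun p => decide (p ≤ start))   -- sum(1 for p in allowed if p <= start)
    match PySem.Int.mod? ((j : Int) + index - 1) m with     -- % m; m = 0 raises ZeroDivisionError (outside Pre_)
    | some r =>
      match PySem.List.pyGet? allowed r with
      | some pos =>
        match PySem.Str.pyGet? pvAlpha pos with
        | some c => String.ofList [c]
        | none => ""
      | none => ""
    | none => ""

-- ===== PRECONDITION & SPEC =====
-- Pre_ excludes exactly the inputs where A's while loop never terminates (index > 0 while every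
-- alphabet position 0..25 occurs in skip_idx); B raises ZeroDivisionError on those same inputs.
def Pre_change_alphabet (_origin : String) (skip_idx : List Int) (index : Int) : Prop :=
  index ≤ 0 ∨ ∃ u : Fin 26, ((u.val : Int) ∉ skip_idx)
instance (origin : String) (skip_idx : List Int) (index : Int) : Decidable (Pre_change_alphabet origin skip_idx index) := by unfold Pre_change_alphabet; infer_instance
def pvWitness_change_alphabet : String × List Int × Int := ("a", ([0, 3], 5))

def Spec_change_alphabet (origin : String) (skip_idx : List Int) (index : Int) (out : String) : Prop := out = change_alphabet_alt origin skip_idx index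
instance (origin : String) (skip_idx : List Int) (index : Int) (out : String) : Decidable (Spec_change_alphabet origin skip_idx index out) := by unfold Spec_change_alphabet; infer_instance

-- ===== CLAIM (what is proved, stated in full; the proofs are below) =====
def Claim_equal_change_alphabet : Prop := ∀ (origin : String) (skip_idx : List Int) (index : Int), Dom_change_alphabet origin skip_idx index → Pre_change_alphabet origin skip_idx index → Spec_change_alphabet origin skip_idx index (change_alphabet origin skip_idx index)

-- ===== LEMMAS AND PROOFS =====

-- the non-skipped positions 0..25, as a sorted Nat list (proof-side mirror of B's `allowed`)
def allowedL (skip : List Int) : List Nat := (List.range 26).filter (fun u => decide ((u : Int) ∉ skip))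
-- number of allowed positions ≤ t
def jcnt (skip : List Int) (t : Nat) : Nat := ((allowedL skip).filter (fun u => decide (u ≤ t))).length
-- the position A's loop ends on, in closed form
def tgt (skip : List Int) (t idx : Nat) : Nat := (allowedL skip).getD ((jcnt skip t + idx - 1) % (allowedL skip).length) 0
-- Nat mirror of changeLoop
def loopN (skip : List Int) : Nat → Nat → Nat → Nat
  | 0, t, _ => t
  | f+1, t, idx =>
    if 0 < idx then
      let t' := (t + 1) % 26
      loopN skip f t' (if ((t' : Int)) ∈ skip then idx else idx - 1)
    else t

lemma mem_allowedL (skip : List Int) (u : Nat) : u ∈ allowedL skip ↔ u < 26 ∧ ((u : Int) ∉ skip) := by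
  simp [allowedL, List.mem_filter, List.mem_range]

lemma pairwise_allowedL (skip : List Int) : (allowedL skip).Pairwise (· < ·) :=
  List.Pairwise.filter _ (List.pairwise_lt_range)

lemma nodup_allowedL (skip : List Int) : (allowedL skip).Nodup :=
  (pairwise_allowedL skip).imp Nat.ne_of_lt

lemma filter_le_succ_length (l : List Nat) (t : Nat) (hl : l.Nodup) :
    (l.filter (fun u => decide (u ≤ t+1))).length =
    (l.filter (fun u => decide (u ≤ t))).length + (if (t+1) ∈ l then 1 else 0) := by
  induction l with
  | nil => simp
  | cons a l ih =>
    have hnd := hl.of_cons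
    have ha : a ∉ l := (List.nodup_cons.mp hl).1
    by_cases h1 : a = t+1
    · subst h1
      simp [ha, ih hnd]
    · by_cases h2 : a ≤ t
      · simp [h2, Nat.le_succ_of_le h2, ih hnd, List.mem_cons, Ne.symm h1]
        omega
      · have h3 : ¬ a ≤ t+1 := by omega
        simp [h2, h3, ih hnd, List.mem_cons, Ne.symm h1]

lemma filter_le_zero_length (l : List Nat) (hl : l.Nodup) :
    (l.filter (fun u => decide (u ≤ 0))).length = (if 0 ∈ l then 1 else 0) := by
  induction l with
  | nil => simp
  | cons a l ih =>
    have hnd := hl.of_cons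
    have ha : a ∉ l := (List.nodup_cons.mp hl).1
    by_cases h : a = 0
    · subst h
      simp [ha]
      exact fun b hb hb0 => ha (hb0 ▸ hb)
    · have h2 : ¬ a ≤ 0 := by omega
      rw [List.filter_cons, if_neg (by simpa using h2), ih hnd]
      simp [Ne.symm h]

lemma sortedIndex (l : List Nat) (hl : l.Pairwise (· < ·)) (x : Nat) (hx : x ∈ l) :
    0 < (l.filter (fun u => decide (u ≤ x))).length ∧
    (l.filter (fun u => decide (u ≤ x))).length ≤ l.length ∧
    l.getD ((l.filter (fun u => decide (u ≤ x))).length - 1) 0 = x := by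
  induction l with
  | nil => simp at hx
  | cons a l ih =>
    have hgt : ∀ b ∈ l, a < b := fun b hb => (List.pairwise_cons.mp hl).1 b hb
    rcases List.mem_cons.mp hx with rfl | hx'
    · have : l.filter (fun u => decide (u ≤ x)) = [] := by
        apply List.filter_eq_nil_iff.mpr
        intro b hb; simpa using Nat.not_le_of_lt (hgt b hb)
      simp [this]
    · have halt : a < x := hgt x hx'
      obtain ⟨h1, h2, h3⟩ := ih (List.pairwise_cons.mp hl).2 hx'
      have : (l.filter (fun u => decide (u ≤ x))).length ≥ 1 := h1
      simp only [List.filter_cons, decide_eq_true_eq, if_pos (Nat.le_of_lt halt)]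
      refine ⟨by simp, by simp; omega, ?_⟩
      simp only [List.length_cons]
      have : (l.filter (fun u => decide (u ≤ x))).length + 1 - 1 =
        ((l.filter (fun u => decide (u ≤ x))).length - 1) + 1 := by omega
      rw [this, List.getD_cons_succ]
      exact h3

lemma jcnt_succ (skip : List Int) (t : Nat) :
    jcnt skip (t+1) = jcnt skip t + (if (t+1) ∈ allowedL skip then 1 else 0) :=
  filter_le_succ_length _ t (nodup_allowedL skip)

lemma jcnt_zero (skip : List Int) :
    jcnt skip 0 = (if 0 ∈ allowedL skip then 1 else 0) :=
  filter_le_zero_length _ (nodup_allowedL skip)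

lemma jcnt_le (skip : List Int) (t : Nat) : jcnt skip t ≤ (allowedL skip).length :=
  List.length_filter_le _ _

lemma jcnt_25 (skip : List Int) : jcnt skip 25 = (allowedL skip).length := by
  unfold jcnt
  congr 1
  apply List.filter_eq_self.mpr
  intro b hb
  have : b < 26 := ((mem_allowedL skip b).mp hb).1
  simp; omega

lemma coverage (skip : List Int) (hne : (allowedL skip) ≠ []) (t : Nat) :
    ∃ d, d < 26 ∧ ((t+1+d) % 26) ∈ allowedL skip := by
  obtain ⟨u, hu⟩ := List.exists_mem_of_ne_nil _ hne
  obtain ⟨hu26, husk⟩ := (mem_allowedL skip u).mp hu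
  refine ⟨(u + 26 - (t+1) % 26) % 26, by omega, ?_⟩
  have : (t + 1 + (u + 26 - (t+1) % 26) % 26) % 26 = u := by omega
  rw [this]; exact hu

lemma loopN_zero (skip : List Int) (f t : Nat) : loopN skip f t 0 = t := by
  cases f <;> simp [loopN]

lemma tgt_step_skip (skip : List Int) (t idx : Nat) (ht : t < 26) (hidx : 0 < idx)
    (h : ((t+1) % 26) ∉ allowedL skip) : tgt skip ((t+1) % 26) idx = tgt skip t idx := by
  by_cases h25 : t < 25
  · rw [Nat.mod_eq_of_lt (by omega)] at h ⊢
    unfold tgt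
    rw [jcnt_succ, if_neg h, Nat.add_zero]
  · have ht25 : t = 25 := by omega
    subst ht25
    have h0 : (25 + 1) % 26 = 0 := by norm_num
    rw [h0] at h ⊢
    unfold tgt
    rw [jcnt_zero, if_neg h, jcnt_25]
    have e1 : (allowedL skip).length + idx - 1 = (allowedL skip).length + (idx - 1) := by omega
    have e2 : 0 + idx - 1 = idx - 1 := by omega
    rw [e1, e2, Nat.add_mod_left]

lemma tgt_step_mem (skip : List Int) (t idx : Nat) (ht : t < 26) (hidx : 2 ≤ idx)
    (h : ((t+1) % 26) ∈ allowedL skip) : tgt skip ((t+1) % 26) (idx - 1) = tgt skip t idx := by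
  by_cases h25 : t < 25
  · rw [Nat.mod_eq_of_lt (by omega)] at h ⊢
    unfold tgt
    rw [jcnt_succ, if_pos h]
    have : jcnt skip t + 1 + (idx - 1) - 1 = jcnt skip t + idx - 1 := by omega
    rw [this]
  · have ht25 : t = 25 := by omega
    subst ht25
    have h0 : (25 + 1) % 26 = 0 := by norm_num
    rw [h0] at h ⊢
    unfold tgt
    rw [jcnt_zero, if_pos h, jcnt_25]
    have e1 : (allowedL skip).length + idx - 1 = (allowedL skip).length + (idx - 1) := by omega
    have e2 : 1 + (idx - 1) - 1 = idx - 1 := by omega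
    rw [e1, e2, Nat.add_mod_left]

lemma tgt_one (skip : List Int) (t : Nat) (ht : t < 26)
    (h : ((t+1) % 26) ∈ allowedL skip) : tgt skip t 1 = (t+1) % 26 := by
  have hm : 0 < (allowedL skip).length := List.length_pos_of_mem h
  by_cases h25 : t < 25
  · rw [Nat.mod_eq_of_lt (by omega)] at h ⊢
    obtain ⟨h1, h2, h3⟩ := sortedIndex (allowedL skip) (pairwise_allowedL skip) (t+1) h
    have hj : jcnt skip (t+1) = jcnt skip t + 1 := by rw [jcnt_succ, if_pos h]
    unfold tgt
    have hlt : jcnt skip t < (allowedL skip).length := by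
      have := jcnt_le skip (t+1); unfold jcnt at *; omega
    rw [Nat.add_sub_cancel, Nat.mod_eq_of_lt hlt]
    have : jcnt skip t = jcnt skip (t+1) - 1 := by omega
    rw [this]
    exact h3
  · have ht25 : t = 25 := by omega
    subst ht25
    have h0 : (25 + 1) % 26 = 0 := by norm_num
    rw [h0] at h ⊢
    obtain ⟨h1, h2, h3⟩ := sortedIndex (allowedL skip) (pairwise_allowedL skip) 0 h
    have hj : jcnt skip 0 = 1 := by rw [jcnt_zero, if_pos h]
    unfold tgt
    rw [jcnt_25, Nat.add_sub_cancel, Nat.mod_self]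
    unfold jcnt at hj
    rw [hj] at h3
    simpa using h3

lemma loopN_eq_tgt (skip : List Int) :
    ∀ idx, 0 < idx → ∀ c t f : Nat, t < 26 →
      (∃ d, d < c ∧ ((t+1+d) % 26) ∈ allowedL skip) →
      c + 26*(idx-1) ≤ f →
      loopN skip f t idx = tgt skip t idx := by
  intro idx
  induction idx using Nat.strong_induction_on with
  | _ idx IH =>
    intro hidx c
    induction c with
    | zero => intro t f _ hex _; exact absurd hex (by simp)
    | succ c ihc =>
      intro t f ht hex hf
      obtain ⟨f', rfl⟩ : ∃ f', f = f' + 1 := ⟨f - 1, by omega⟩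
      simp only [loopN, if_pos hidx]
      set t' := (t + 1) % 26 with ht'
      have ht'26 : t' < 26 := Nat.mod_lt _ (by norm_num)
      by_cases hmem : ((t' : Int)) ∈ skip
      · -- skipped position: index unchanged
        have ht'na : t' ∉ allowedL skip := fun hc => ((mem_allowedL skip t').mp hc).2 hmem
        rw [if_pos hmem]
        have hex' : ∃ d, d < c ∧ ((t'+1+d) % 26) ∈ allowedL skip := by
          obtain ⟨d, hd, hdm⟩ := hex
          rcases Nat.eq_zero_or_pos d with rfl | hdpos
          · exact absurd (by simpa using hdm) ht'na
          · refine ⟨d - 1, by omega, ?_⟩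
            have : (t' + 1 + (d - 1)) % 26 = (t + 1 + d) % 26 := by omega
            rw [this]; exact hdm
        rw [ihc t' f' ht'26 hex' (by omega)]
        exact tgt_step_skip skip t idx ht hidx ht'na
      · -- allowed position: index decreases
        have ht'a : t' ∈ allowedL skip := by
          rw [mem_allowedL]; exact ⟨ht'26, hmem⟩
        rw [if_neg hmem]
        rcases Nat.lt_or_ge idx 2 with h1 | h2
        · have : idx = 1 := by omega
          subst this
          rw [show (1:Nat) - 1 = 0 from rfl, loopN_zero]
          exact (tgt_one skip t ht ht'a).symm
        · have hne : allowedL skip ≠ [] := List.ne_nil_of_mem ht'a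
          obtain ⟨d, hd, hdm⟩ := coverage skip hne t'
          rw [IH (idx - 1) (by omega) (by omega) 26 t' f' ht'26 ⟨d, hd, hdm⟩ (by omega)]
          exact tgt_step_mem skip t idx ht h2 ht'a

lemma changeLoop_eq_loopN (skip : List Int) :
    ∀ (f : Nat) (t idx : Int), 0 ≤ t → t < 26 →
      changeLoop skip f t idx = ((loopN skip f t.toNat idx.toNat : Nat) : Int) := by
  intro f
  induction f with
  | zero => intro t idx h0 h26; simp [changeLoop, loopN, Int.toNat_of_nonneg h0]
  | succ f ih =>
    intro t idx h0 h26
    simp only [changeLoop, loopN]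
    by_cases hidx : 0 < idx
    · have hidxN : 0 < idx.toNat := by omega
      rw [if_pos hidx, if_pos hidxN]
      have hmod : PySem.Int.mod (t + 1) 26 = (((t.toNat + 1) % 26 : Nat) : Int) := by
        rw [PySem.Int.mod_eq_emod_of_pos (by norm_num)]
        omega
      rw [hmod]
      by_cases hmem : ((((t.toNat + 1) % 26 : Nat) : Int)) ∈ skip
      · rw [if_pos hmem, if_pos hmem, ih _ idx (by positivity) (by exact_mod_cast Nat.mod_lt _ (by norm_num)),
          Int.toNat_natCast]
      · rw [if_neg hmem, if_neg hmem, ih _ (idx - 1) (by positivity) (by exact_mod_cast Nat.mod_lt _ (by norm_num)),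
          Int.toNat_natCast, show (idx - 1).toNat = idx.toNat - 1 from by omega]
    · have hidxN : ¬ 0 < idx.toNat := by omega
      rw [if_neg hidx, if_neg hidxN, Int.toNat_of_nonneg h0]

lemma changeLoop_mod_start (skip : List Int) (f : Nat) (t idx : Int) (hidx : 0 < idx) :
    changeLoop skip (f+1) t idx = changeLoop skip (f+1) (PySem.Int.mod t 26) idx := by
  simp only [changeLoop, if_pos hidx]
  have : PySem.Int.mod (t + 1) 26 = PySem.Int.mod (PySem.Int.mod t 26 + 1) 26 := by
    rw [PySem.Int.mod_eq_emod_of_pos (by norm_num), PySem.Int.mod_eq_emod_of_pos (by norm_num),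
      PySem.Int.mod_eq_emod_of_pos (by norm_num)]
    omega
  rw [← this]

lemma find_alpha_bounds (origin : String) :
    -1 ≤ PySem.Str.find pvAlpha origin ∧ PySem.Str.find pvAlpha origin ≤ 25 := by
  have he : PySem.Str.find pvAlpha origin = PySem.Chars.find pvAlpha.toList origin.toList := by
    simp [PySem.Str.find_eq]
  rw [he]
  refine ⟨PySem.Chars.neg_one_le_find _ _, ?_⟩
  by_contra hgt
  simp only [not_le] at hgt
  have hpos : 0 ≤ PySem.Chars.find pvAlpha.toList origin.toList := by omega
  have hpre := (PySem.Chars.find_spec hpos).1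
  have hlen : pvAlpha.toList.length = 26 := by decide
  have hdrop : pvAlpha.toList.drop (PySem.Chars.find pvAlpha.toList origin.toList).toNat = [] := by
    apply List.drop_eq_nil_of_le
    omega
  rw [hdrop] at hpre
  have : origin.toList = [] := List.prefix_nil.mp hpre
  rw [this, PySem.Chars.find_nil] at hgt
  omega

lemma allowedB_eq (skip : List Int) :
    (PySem.List.pyRange 0 26 1).filter (fun p => decide (p ∉ skip)) =
    (allowedL skip).map (fun u : Nat => (u : Int)) := by
  rw [PySem.List.pyRange_one]
  unfold allowedL
  rw [List.filter_map]
  norm_num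
  rfl

lemma countP_allowedB (skip : List Int) (s : Int) (hs : 0 ≤ s) :
    ((allowedL skip).map (fun u : Nat => (u : Int))).countP (fun p => decide (p ≤ s)) = jcnt skip s.toNat := by
  rw [jcnt, ← List.countP_eq_length_filter]
  have h1 : ((allowedL skip).map (fun u : Nat => (u : Int))).countP (fun p => decide (p ≤ s)) =
      (allowedL skip).countP (fun u : Nat => decide ((u : Int) ≤ s)) := by
    rw [List.countP_map]
    rfl
  rw [h1]
  apply List.countP_congr
  intro u _
  simp only [decide_eq_true_eq]
  omega

lemma countP_allowedB_neg (skip : List Int) (s : Int) (hs : s < 0) :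
    ((allowedL skip).map (fun u : Nat => (u : Int))).countP (fun p => decide (p ≤ s)) = 0 := by
  rw [List.countP_eq_zero]
  intro u hu
  obtain ⟨v, _, rfl⟩ := List.mem_map.mp hu
  simp only [decide_eq_true_eq]
  omega

-- ===== VERDICT (by name: the statement is the Claim_ definition above) =====
theorem change_alphabet_spec : Claim_equal_change_alphabet := by
  intro origin skip index _hdom hpre
  show change_alphabet origin skip index = change_alphabet_alt origin skip index
  unfold change_alphabet change_alphabet_alt
  dsimp only
  obtain ⟨hlo, hhi⟩ := find_alpha_bounds origin
  by_cases hile : index ≤ 0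
  · rw [if_pos hile]
    have h0 : 26 * index.toNat = 0 := by omega
    rw [h0]
    rw [show changeLoop skip 0 (PySem.Str.find pvAlpha origin) index = PySem.Str.find pvAlpha origin from rfl]
    by_cases hneg : 0 ≤ PySem.Str.find pvAlpha origin
    · rw [show PySem.Int.mod (PySem.Str.find pvAlpha origin) 26 = PySem.Str.find pvAlpha origin from by
        rw [PySem.Int.mod_eq_emod_of_pos (by norm_num)]; omega]
    · have hm1 : PySem.Str.find pvAlpha origin = -1 := by omega
      rw [hm1]
      rfl
  · rw [if_neg hile]
    -- nonempty allowed set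
    obtain ⟨u, hu⟩ := hpre.resolve_left hile
    have humem : u.val ∈ allowedL skip := (mem_allowedL skip u.val).mpr ⟨u.isLt, hu⟩
    have hne : allowedL skip ≠ [] := List.ne_nil_of_mem humem
    have hmL : 0 < (allowedL skip).length := List.length_pos_of_mem humem
    set f0 := PySem.Str.find pvAlpha origin with hf0def
    set idxN := index.toNat with hidxN
    have hidx1 : 0 < idxN := by omega
    -- A side: loop = tgt
    obtain ⟨fuel, hfuel⟩ : ∃ fl, 26 * idxN = fl + 1 := ⟨26 * idxN - 1, by omega⟩
    rw [hfuel, changeLoop_mod_start skip fuel f0 index (by omega), ← hfuel]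
    set t0i := PySem.Int.mod f0 26 with ht0i
    have h0 : 0 ≤ t0i := PySem.Int.mod_nonneg _ (by norm_num)
    have h26 : t0i < 26 := PySem.Int.mod_lt _ (by norm_num)
    rw [changeLoop_eq_loopN skip _ t0i index h0 h26]
    rw [loopN_eq_tgt skip idxN hidx1 26 t0i.toNat (26 * idxN) (by omega)
      (coverage skip hne t0i.toNat) (by omega)]
    -- B side
    rw [allowedB_eq skip]
    have hlen : PySem.List.len ((allowedL skip).map (fun u : Nat => (u : Int))) =
        (((allowedL skip).length : Nat) : Int) := by
      simp [PySem.List.len_eq]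
    rw [hlen]
    set mL := (allowedL skip).length with hmLdef
    set jv := ((allowedL skip).map (fun u : Nat => (u : Int))).countP (fun p => decide (p ≤ f0)) with hjv
    have hmod? : PySem.Int.mod? ((jv : Int) + index - 1) ((mL : Nat) : Int) =
        some (((jv + idxN - 1) % mL : Nat) : Int) := by
      have hxx : ((jv : Int) + index - 1) = (((jv + idxN - 1 : Nat) : Nat) : Int) := by
        omega
      rw [hxx]
      have hstep : PySem.Int.mod? (((jv + idxN - 1 : Nat) : Nat) : Int) ((mL : Nat) : Int) =
          some (PySem.Int.mod (((jv + idxN - 1 : Nat) : Nat) : Int) ((mL : Nat) : Int)) := by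
        simp [PySem.Int.mod?, PySem.Int.mod]
        exact hmL.ne'
      rw [hstep, PySem.Int.mod_eq_emod_of_pos (Int.natCast_pos.mpr hmL), Int.natCast_mod]
    rw [hmod?]
    dsimp only
    have hr : (jv + idxN - 1) % mL < mL := Nat.mod_lt _ hmL
    have hget : PySem.List.pyGet? ((allowedL skip).map (fun u : Nat => (u : Int)))
        ((((jv + idxN - 1) % mL : Nat) : Nat) : Int) =
        some ((((allowedL skip).getD ((jv + idxN - 1) % mL) 0 : Nat) : Nat) : Int) := by
      rw [PySem.List.pyGet?_natCast, List.getElem?_map,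
        List.getElem?_eq_getElem (by simpa using hr), List.getD_eq_getElem _ _ hr]
      rfl
    rw [hget]
    dsimp only
    -- the two positions coincide
    have hpos : tgt skip t0i.toNat idxN = (allowedL skip).getD ((jv + idxN - 1) % mL) 0 := by
      unfold tgt
      by_cases hneg : 0 ≤ f0
      · have ht0 : t0i.toNat = f0.toNat := by
          rw [ht0i, PySem.Int.mod_eq_emod_of_pos (by norm_num)]; omega
        have : jv = jcnt skip f0.toNat := countP_allowedB skip f0 hneg
        rw [ht0, ← this]
      · have hm1 : f0 = -1 := by omega
        have ht0 : t0i.toNat = 25 := by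
          rw [ht0i, hm1]; rfl
        have hjv0 : jv = 0 := countP_allowedB_neg skip f0 (by omega)
        rw [ht0, hjv0, jcnt_25]
        have e1 : mL + idxN - 1 = mL + (idxN - 1) := by omega
        have e2 : 0 + idxN - 1 = idxN - 1 := by omega
        rw [e1, e2, Nat.add_mod_left]
    rw [hpos]
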